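-- pv_equiv track=rewrite | github.com/joohyuk2074/TIL_PRACTICE_CODE | python-algorithm/programmers/level1/명예의 전당(1).py | solution
-- ===== SOURCE A (Python) =====
-- def solution(k, score):
--     answer = []
--
--     hall_of_fame = []
--     for num in score:
--         if len(hall_of_fame) < k:
--             hall_of_fame.append(num)
--         else:
--             hall_of_fame.sort()
--             for i in range(0, len(hall_of_fame)):
--                 if hall_of_fame[i] < num:
--                     hall_of_fame[i] = num
--                     break
--
--         min_score = min(hall_of_fame)
--         answer.append(min_score)
--
--     return answer
--
-- k = 3
--
-- score = [10, 100, 20, 150, 1, 100, 200]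
-- ===== SOURCE B (Python) =====
-- def solution(k, score):
--     # Keep EVERY score seen so far in one descending sorted list; nothing is
--     # ever removed or re-sorted.  The day's answer is simply the k-th entry
--     # (the k-th largest so far), or the last entry while fewer than k days
--     # have passed.
--     seen = []   # all scores so far, descending
--     answer = []
--     for num in score:
--         i = 0
--         while i < len(seen) and seen[i] >= num:
--             i += 1
--         seen.insert(i, num)
--         answer.append(seen[k - 1] if k <= len(seen) else seen[-1])
--     return answer
-- ===== Notes on version B (the rewrite author's own statement) =====
-- stated objective: alternative
-- what changed: B never maintains a k-element hall at all: it keeps all scores seen so far in one descending sorted list (one insertion per day) and reads each day's answer by index (seen[k-1], or seen[-1] while fewer than k days), replacing A's per-day full sort plus replace-the-minimum scan.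
-- outside the precondition, e.g. on solution(0, [5]): A raises ValueError, B returns [5]; on solution(-1, [5]): A raises ValueError, B raises IndexError
import Mathlib
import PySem

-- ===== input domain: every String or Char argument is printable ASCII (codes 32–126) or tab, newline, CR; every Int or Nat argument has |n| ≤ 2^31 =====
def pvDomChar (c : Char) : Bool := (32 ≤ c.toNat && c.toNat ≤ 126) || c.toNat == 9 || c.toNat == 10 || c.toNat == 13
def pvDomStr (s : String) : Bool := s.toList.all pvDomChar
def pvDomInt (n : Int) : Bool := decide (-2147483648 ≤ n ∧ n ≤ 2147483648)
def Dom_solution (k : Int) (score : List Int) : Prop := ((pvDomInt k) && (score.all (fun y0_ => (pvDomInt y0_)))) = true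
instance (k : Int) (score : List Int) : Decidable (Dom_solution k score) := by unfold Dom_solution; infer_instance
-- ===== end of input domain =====

-- B drops A's k-element hall entirely: it keeps all scores seen so far in one descending
-- sorted list and reads each day's answer by index (alternative decomposition, not faster).

-- ===== PORT A =====
-- the inner 'for i in range(len(hall)): if hall[i] < num: hall[i] = num; break' loop
def replaceFirstLt (num : Int) : List Int → List Int
  | [] => []
  | x :: xs => if x < num then num :: xs else x :: replaceFirstLt num xs

def solution (k : Int) (score : List Int) : List Int :=
  (score.foldl (fun (st : List Int × List Int) num =>
    let hall :=
      if (PySem.List.len st.2) < k then st.2 ++ [num]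
      else replaceFirstLt num (PySem.List.sorted st.2 (fun x => x))
    -- min(hall): none = ValueError on empty hall, excluded by Pre_solution
    (st.1 ++ [(PySem.List.min? hall (fun x => x)).getD 0], hall)) ([], [])).1

-- ===== PORT B =====
-- the 'i = 0; while i < len(seen) and seen[i] >= num' scan followed by seen.insert(i, num)
def insertDesc (num : Int) : List Int → List Int
  | [] => [num]
  | x :: xs => if x ≥ num then x :: insertDesc num xs else num :: x :: xs

-- the for-loop over the days, carrying the descending list of all scores seen so far
def solveB (k : Int) (seen : List Int) : List Int → List Int
  | [] => []
  | num :: rest =>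
    let s := insertDesc num seen
    -- seen[k-1] / seen[-1]: out of range = IndexError, excluded by Pre_solution
    (if k ≤ PySem.List.len s then (PySem.List.pyGet? s (k - 1)).getD 0
     else (PySem.List.pyGet? s (-1)).getD 0) :: solveB k s rest

def solution_alt (k : Int) (score : List Int) : List Int := solveB k [] score

-- ===== PRECONDITION & SPEC =====
-- Pre_ excludes k ≤ 0 with a nonempty score, where A raises ValueError (min of an empty list); B's behaviour there (an IndexError, or a value from negative-index wraparound) is accidental.
def Pre_solution (k : Int) (score : List Int) : Prop := score = [] ∨ 1 ≤ k
instance (k : Int) (score : List Int) : Decidable (Pre_solution k score) := by unfold Pre_solution; infer_instance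
def pvWitness_solution : Int × List Int := (3, [10, 100, 20, 150, 1, 100, 200])
def Spec_solution (k : Int) (score : List Int) (out : List Int) : Prop := out = solution_alt k score
instance (k : Int) (score : List Int) (out : List Int) : Decidable (Spec_solution k score out) := by unfold Spec_solution; infer_instance

-- ===== CLAIM (what is proved, stated in full; the proofs are below) =====
def Claim_equal_solution : Prop := ∀ (k : Int) (score : List Int), Dom_solution k score → Pre_solution k score → Spec_solution k score (solution k score)

-- ===== LEMMAS AND PROOFS =====

theorem insertDesc_perm (num : Int) (l : List Int) : (insertDesc num l).Perm (num :: l) := by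
  induction l with
  | nil => simp [insertDesc]
  | cons x xs ih =>
    simp only [insertDesc]
    split_ifs with h
    · exact ((ih.cons x).trans (List.Perm.swap num x xs))
    · exact List.Perm.refl _

theorem insertDesc_pairwise (num : Int) {l : List Int} (h : l.Pairwise (· ≥ ·)) :
    (insertDesc num l).Pairwise (· ≥ ·) := by
  induction l with
  | nil => simp [insertDesc]
  | cons x xs ih =>
    rcases List.pairwise_cons.mp h with ⟨hx, hxs⟩
    simp only [insertDesc]
    split_ifs with hge
    · refine List.pairwise_cons.mpr ⟨?_, ih hxs⟩
      intro y hy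
      rcases List.mem_cons.mp ((insertDesc_perm num xs).mem_iff.mp hy) with heq | hy'
      · exact heq ▸ hge
      · exact hx y hy'
    · refine List.pairwise_cons.mpr ⟨?_, h⟩
      intro y hy
      rcases List.mem_cons.mp hy with heq | hy'
      · exact heq ▸ le_of_lt (not_le.mp hge)
      · exact le_trans (hx y hy') (le_of_lt (not_le.mp hge))

theorem insertDesc_ne_nil (num : Int) (l : List Int) : insertDesc num l ≠ [] := by
  cases l with
  | nil => simp [insertDesc]
  | cons x xs => simp only [insertDesc]; split_ifs <;> simp

theorem insertDesc_length (num : Int) (l : List Int) :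
    (insertDesc num l).length = l.length + 1 := (insertDesc_perm num l).length_eq

theorem replaceFirstLt_eq_self {num : Int} {l : List Int} (h : ∀ y ∈ l, ¬ y < num) :
    replaceFirstLt num l = l := by
  induction l with
  | nil => rfl
  | cons x xs ih =>
    simp only [replaceFirstLt]
    rw [if_neg (h x (List.mem_cons_self ..)),
        ih (fun y hy => h y (List.mem_cons_of_mem _ hy))]

theorem min?_congr_perm {l m : List Int} (h : l.Perm m) :
    PySem.List.min? l (fun x => x) = PySem.List.min? m (fun x => x) := by
  cases hl : PySem.List.min? l (fun x => x) with
  | none =>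
    have hle : l = [] := (PySem.List.min?_eq_none_iff l _).mp hl
    subst hle
    rw [h.symm.eq_nil]
    rfl
  | some a =>
    cases hm : PySem.List.min? m (fun x => x) with
    | none =>
      have hme : m = [] := (PySem.List.min?_eq_none_iff m _).mp hm
      subst hme
      rw [h.eq_nil] at hl
      rw [(PySem.List.min?_eq_none_iff [] (fun x : Int => x)).mpr rfl] at hl
      exact absurd hl (by simp)
    | some b =>
      have ha := PySem.List.min?_mem hl
      have hb := PySem.List.min?_mem hm
      have h1 : a ≤ b := PySem.List.min?_isMin hl b (h.symm.subset hb)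
      have h2 : b ≤ a := PySem.List.min?_isMin hm a (h.subset ha)
      rw [le_antisymm h1 h2]

theorem getLast?_le_mem : ∀ (l : List Int), l.Pairwise (· ≥ ·) →
    ∀ y ∈ l, ∀ z, l.getLast? = some z → z ≤ y := by
  intro l
  induction l with
  | nil => simp
  | cons x xs ih =>
    intro hp y hy z hz
    rcases List.pairwise_cons.mp hp with ⟨hx, hxs⟩
    cases hxs' : xs with
    | nil =>
      subst hxs'
      simp at hy hz
      omega
    | cons a as =>
      subst hxs'
      rw [List.getLast?_cons_cons] at hz
      rcases List.mem_cons.mp hy with heq | hy'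
      · exact le_trans (hx z (List.mem_of_getLast? hz)) (le_of_eq heq.symm)
      · exact ih hxs y hy' z hz

theorem min?_desc {l : List Int} (hp : l.Pairwise (· ≥ ·)) (hne : l ≠ []) :
    PySem.List.min? l (fun x => x) = l.getLast? := by
  cases hz : l.getLast? with
  | none => exact absurd (List.getLast?_eq_none_iff.mp hz) hne
  | some z =>
    cases hm : PySem.List.min? l (fun x => x) with
    | none => simp [PySem.List.min?_eq_none_iff] at hm; exact absurd hm hne
    | some m =>
      have hmem := PySem.List.min?_mem hm
      have hmin := PySem.List.min?_isMin hm z (List.mem_of_getLast? hz)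
      have hle := getLast?_le_mem l hp m hmem z hz
      rw [le_antisymm hmin hle]

theorem getLast?_take (l : List Int) (κ : Nat) (h1 : 1 ≤ κ) (h2 : κ ≤ l.length) :
    (l.take κ).getLast? = l[κ - 1]? := by
  have hlen : (l.take κ).length = κ := by simp [Nat.min_eq_left h2]
  rw [List.getLast?_eq_getElem?, hlen, List.getElem?_take_of_lt (by omega)]

theorem dropLast_take (l : List Int) (n : Nat) (h : n + 1 ≤ l.length) :
    (l.take (n + 1)).dropLast = l.take n := by
  induction l generalizing n with
  | nil => simp at h
  | cons x xs ih =>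
    cases n with
    | zero => simp
    | succ j =>
      rw [List.take_succ_cons, List.take_succ_cons]
      have hne : xs.take (j + 1) ≠ [] := by
        have : 0 < (xs.take (j + 1)).length := by
          simp at h ⊢
          omega
        exact List.ne_nil_of_length_pos this
      rw [List.dropLast_cons_of_ne_nil hne, ih j (by simp at h; omega)]

-- when num does not beat the k-th largest, the top-k prefix is unchanged
theorem take_insertDesc_small : ∀ (seen : List Int) (κ : Nat), 1 ≤ κ → κ ≤ seen.length →
    (num : Int) → seen.Pairwise (· ≥ ·) → num ≤ seen.getD (κ - 1) 0 →
    (insertDesc num seen).take κ = seen.take κ := by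
  intro seen
  induction seen with
  | nil => intro κ h1 h2; simp at h2; omega
  | cons x xs ih =>
    intro κ h1 h2 num hp hle
    rcases List.pairwise_cons.mp hp with ⟨hx, hxs⟩
    obtain ⟨j, rfl⟩ : ∃ j, κ = j + 1 := ⟨κ - 1, by omega⟩
    have hxge : num ≤ x := by
      cases j with
      | zero => simpa using hle
      | succ i =>
        have hilt : i < xs.length := by simp at h2; omega
        have hmem : xs.getD i 0 ∈ xs := by
          rw [List.getD_eq_getElem xs 0 hilt]
          exact List.getElem_mem hilt
        have := hx _ hmem
        simp only [Nat.add_sub_cancel, List.getD_cons_succ] at hle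
        omega
    simp only [insertDesc, if_pos hxge, List.take_succ_cons]
    cases j with
    | zero => simp
    | succ i =>
      rw [ih (i + 1) (by omega) (by simp at h2; omega) num hxs
        (by simpa using hle)]

-- when num beats the k-th largest, num replaces it in the top-k prefix
theorem take_insertDesc_big : ∀ (seen : List Int) (κ : Nat), 1 ≤ κ → κ ≤ seen.length →
    (num : Int) → seen.Pairwise (· ≥ ·) → seen.getD (κ - 1) 0 < num →
    ((insertDesc num seen).take κ).Perm (num :: (seen.take κ).dropLast) := by
  intro seen
  induction seen with
  | nil => intro κ h1 h2; simp at h2; omega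
  | cons x xs ih =>
    intro κ h1 h2 num hp hlt
    rcases List.pairwise_cons.mp hp with ⟨hx, hxs⟩
    obtain ⟨j, rfl⟩ : ∃ j, κ = j + 1 := ⟨κ - 1, by omega⟩
    cases j with
    | zero =>
      simp only [Nat.add_sub_cancel, List.getD_cons_zero] at hlt
      simp [insertDesc, not_le.mpr hlt]
    | succ i =>
      simp only [Nat.add_sub_cancel, List.getD_cons_succ] at hlt
      have h2' : i + 1 ≤ xs.length := by simp at h2; omega
      by_cases hge : x ≥ num
      · simp only [insertDesc, if_pos hge, List.take_succ_cons]
        have hperm := ih (i + 1) (by omega) h2' num hxs (by simpa using hlt)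
        have hne : xs.take (i + 1) ≠ [] :=
          List.ne_nil_of_length_pos (by simp; omega)
        rw [List.dropLast_cons_of_ne_nil hne]
        exact (hperm.cons x).trans (List.Perm.swap num x _)
      · simp only [insertDesc, if_neg hge, List.take_succ_cons]
        have hne : xs.take (i + 1) ≠ [] :=
          List.ne_nil_of_length_pos (by simp; omega)
        rw [List.dropLast_cons_of_ne_nil hne, dropLast_take xs i (by omega)]

-- the combined loop invariant: A's hall is (a permutation of) the k largest of B's seen list
theorem loop_eq (k : Int) (hk : 1 ≤ k) :
    ∀ (score ans hallA seen : List Int), seen.Pairwise (· ≥ ·) →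
    hallA.Perm (seen.take k.toNat) → hallA.length = min k.toNat seen.length →
    (score.foldl (fun (st : List Int × List Int) num =>
      let hall :=
        if (PySem.List.len st.2) < k then st.2 ++ [num]
        else replaceFirstLt num (PySem.List.sorted st.2 (fun x => x))
      (st.1 ++ [(PySem.List.min? hall (fun x => x)).getD 0], hall)) (ans, hallA)).1
    = ans ++ solveB k seen score := by
  intro score
  induction score with
  | nil => intro ans hallA seen _ _ _; simp [solveB]
  | cons num rest ih =>
    intro ans hallA seen hsort hperm hlen
    have hκ1 : 1 ≤ k.toNat := by omega
    set κ := k.toNat with hκ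
    set s := insertDesc num seen with hs
    have hsperm : s.Perm (num :: seen) := insertDesc_perm num seen
    have hssort : s.Pairwise (· ≥ ·) := insertDesc_pairwise num hsort
    have hslen : s.length = seen.length + 1 := insertDesc_length num seen
    have hsne : s ≠ [] := insertDesc_ne_nil num seen
    simp only [List.foldl_cons, solveB]
    by_cases hcase : (PySem.List.len hallA) < k
    · -- append phase: A appends; all of seen (and s) still fits in the hall
      have hseenlt : seen.length < κ := by
        rw [PySem.List.len_eq] at hcase
        omega
      have htake : seen.take κ = seen := List.take_of_length_le (le_of_lt hseenlt)
      have hstake : s.take κ = s := List.take_of_length_le (by omega)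
      have hperm' : (hallA ++ [num]).Perm s :=
        ((List.perm_append_singleton num hallA).trans
          ((htake ▸ hperm).cons num)).trans hsperm.symm
      have hmin : (PySem.List.min? (hallA ++ [num]) (fun x => x)).getD 0
          = s.getLast?.getD 0 := by
        rw [min?_congr_perm hperm', min?_desc hssort hsne]
      have hb : (if k ≤ PySem.List.len s then (PySem.List.pyGet? s (k - 1)).getD 0
          else (PySem.List.pyGet? s (-1)).getD 0) = s.getLast?.getD 0 := by
        rw [PySem.List.len_eq]
        split_ifs with hkle
        · have hlen_eq : s.length = κ := by omega
          have hcast : k - 1 = ((s.length - 1 : Nat) : Int) := by omega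
          rw [hcast, PySem.List.pyGet?_natCast, ← List.getLast?_eq_getElem?]
        · rw [PySem.List.pyGet?_neg_one]
      rw [if_pos hcase, hmin, ← hb,
        ih (ans ++ [_]) (hallA ++ [num]) s hssort (by rw [hstake]; exact hperm')
          (by simp [hslen]; omega)]
      simp [hs]
    · -- full phase: A sorts and replaces its minimum iff num beats the k-th largest
      have hAlen : hallA.length = κ := by
        rw [PySem.List.len_eq] at hcase
        omega
      have hseenge : κ ≤ seen.length := by
        rw [hAlen] at hlen
        omega
      set t := seen.take κ with ht
      have htne : t ≠ [] := List.ne_nil_of_length_pos (by simp [ht]; omega)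
      have htsort : t.Pairwise (· ≥ ·) := hsort.sublist (List.take_sublist κ seen)
      have htrev : t.reverse.Pairwise (· ≤ ·) := by
        rw [List.pairwise_reverse]
        exact htsort
      have hsorted_eq : PySem.List.sorted hallA (fun x => x) = t.reverse :=
        PySem.List.sorted_id_eq_of_perm_of_pairwise hallA t.reverse
          ((t.reverse_perm).trans hperm.symm) htrev
      set m := t.getLast htne with hm
      have hrev_cons : t.reverse = m :: t.dropLast.reverse := by
        conv_lhs => rw [← List.dropLast_append_getLast htne]
        rw [List.reverse_append]
        rfl
      have hmget : seen.getD (κ - 1) 0 = m := by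
        have h1 := getLast?_take seen κ hκ1 hseenge
        rw [← ht, List.getLast?_eq_some_getLast htne, ← hm] at h1
        rw [List.getD_eq_getElem?_getD, ← h1]
        rfl
      have hkle : k ≤ PySem.List.len s := by
        rw [PySem.List.len_eq]
        omega
      have hbval : (if k ≤ PySem.List.len s then (PySem.List.pyGet? s (k - 1)).getD 0
          else (PySem.List.pyGet? s (-1)).getD 0)
          = ((s.take κ).getLast?).getD 0 := by
        rw [if_pos hkle]
        have hcast : k - 1 = ((κ - 1 : Nat) : Int) := by omega
        rw [hcast, PySem.List.pyGet?_natCast, getLast?_take s κ hκ1 (by omega)]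
      have hstsort : (s.take κ).Pairwise (· ≥ ·) := hssort.sublist (List.take_sublist κ s)
      have hstne : s.take κ ≠ [] := List.ne_nil_of_length_pos (by simp; omega)
      rw [if_neg hcase, hsorted_eq, hrev_cons]
      by_cases hlt : m < num
      · -- num enters the hall in place of the old minimum m
        simp only [replaceFirstLt, if_pos hlt]
        have hA : (num :: t.dropLast.reverse).Perm (num :: t.dropLast) :=
          (t.dropLast.reverse_perm).cons num
        have hperm' : (num :: t.dropLast.reverse).Perm (s.take κ) :=
          hA.trans (take_insertDesc_big seen κ hκ1 hseenge num hsort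
            (hmget ▸ hlt)).symm
        have hmin : (PySem.List.min? (num :: t.dropLast.reverse) (fun x => x)).getD 0
            = ((s.take κ).getLast?).getD 0 := by
          rw [min?_congr_perm hperm', min?_desc hstsort hstne]
        rw [hmin, ← hbval,
          ih (ans ++ [_]) (num :: t.dropLast.reverse) s hssort hperm'
            (by rw [hperm'.length_eq]; simp)]
        simp [hs]
      · -- num does not beat the minimum: hall and top-k prefix are unchanged
        have hnochange : replaceFirstLt num (m :: t.dropLast.reverse) = m :: t.dropLast.reverse := by
          apply replaceFirstLt_eq_self
          intro y hy
          rw [← hrev_cons, List.mem_reverse] at hy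
          intro hc
          exact hlt (lt_of_le_of_lt
            (getLast?_le_mem t htsort y hy m (List.getLast?_eq_some_getLast htne)) hc)
        have hstake : s.take κ = t :=
          take_insertDesc_small seen κ hκ1 hseenge num hsort (by omega)
        have hperm' : (m :: t.dropLast.reverse).Perm (s.take κ) := by
          rw [hstake, ← hrev_cons]
          exact t.reverse_perm
        have hmin : (PySem.List.min? (m :: t.dropLast.reverse) (fun x => x)).getD 0
            = ((s.take κ).getLast?).getD 0 := by
          rw [min?_congr_perm hperm', min?_desc hstsort hstne]
        rw [hnochange, hmin, ← hbval,
          ih (ans ++ [_]) (m :: t.dropLast.reverse) s hssort hperm'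
            (by rw [hperm'.length_eq]; simp)]
        simp [hs]

-- ===== VERDICT (by name: the statement is the Claim_ definition above) =====
theorem solution_spec : Claim_equal_solution := by
  unfold Claim_equal_solution
  intro k score _ hpre
  unfold Spec_solution solution solution_alt
  rcases hpre with rfl | hk
  · rfl
  · simpa using loop_eq k hk score [] [] [] List.Pairwise.nil (by simp) (by simp)
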